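-- pv_equiv track=rewrite | github.com/Aniket03052006/PNB | backend/scanner/classifier.py | score_certificate
-- ===== SOURCE A (Python) =====
-- def _norm_alg(value: str | None) -> str:
--     return str(value or "").upper().replace("-", "").replace("_", "").replace(" ", "").replace(".", "")
--
-- def score_certificate(cert_algorithm: str | None, cert_key_bits: int | None) -> int:
--     algo = _norm_alg(cert_algorithm)
--     bits = int(cert_key_bits or 0)
--
--     if any(pqc in algo for pqc in ("MLDSA", "DILITHIUM", "SLHDSA", "SPHINCS")):
--         return 20
--     if "FALCON" in algo:
--         return 18
--
--     if "ECDSA" in algo: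
--         if bits >= 384:
--             return 14
--         if bits >= 256:
--             return 12
--         return 8
--
--     if "RSA" in algo:
--         if bits >= 4096:
--             return 10
--         if bits >= 3072:
--             return 8
--         if bits >= 2048:
--             return 6
--         if bits >= 1024:
--             return 2
--         return 0
--
--     if "ED25519" in algo:
--         return 13
--     if "ED448" in algo:
--         return 14
--     return 0
-- ===== SOURCE B (Python) =====
-- def _norm_alg(value):
--     return str(value or "").upper().replace("-", "").replace("_", "").replace(" ", "").replace(".", "")
--
-- # Ordered keyword -> family classification (order matters, as in the spec).
-- _FAMILY = {
--     "MLDSA": "PQC", "DILITHIUM": "PQC", "SLHDSA": "PQC", "SPHINCS": "PQC",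
--     "FALCON": "FALCON", "ECDSA": "ECDSA", "RSA": "RSA",
--     "ED25519": "ED25519", "ED448": "ED448",
-- }
--
-- # Base score per family ...
-- _BASE = {"PQC": 20, "FALCON": 18, "ECDSA": 8, "RSA": 0, "ED25519": 13, "ED448": 14}
--
-- # ... plus additive increments: each (threshold, weight) contributes its weight iff bits >= threshold.
-- _STEPS = {
--     "ECDSA": ((256, 4), (384, 2)),
--     "RSA": ((1024, 2), (2048, 4), (3072, 2), (4096, 2)),
-- }
--
-- def score_certificate(cert_algorithm, cert_key_bits):
--     algo = _norm_alg(cert_algorithm)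
--     bits = int(cert_key_bits or 0)
--     fam = next((f for k, f in _FAMILY.items() if k in algo), None)
--     if fam is None:
--         return 0
--     return _BASE[fam] + sum(w for t, w in _STEPS.get(fam, ()) if bits >= t)
-- ===== Notes on version B (the rewrite author's own statement) =====
-- stated objective: alternative
-- what changed: B first classifies the algorithm into a family via an ordered keyword map, then computes the score as a base score plus an additive sum of indicator increments over bit thresholds, instead of A's first-match if/elif threshold cascade.
import Mathlib
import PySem

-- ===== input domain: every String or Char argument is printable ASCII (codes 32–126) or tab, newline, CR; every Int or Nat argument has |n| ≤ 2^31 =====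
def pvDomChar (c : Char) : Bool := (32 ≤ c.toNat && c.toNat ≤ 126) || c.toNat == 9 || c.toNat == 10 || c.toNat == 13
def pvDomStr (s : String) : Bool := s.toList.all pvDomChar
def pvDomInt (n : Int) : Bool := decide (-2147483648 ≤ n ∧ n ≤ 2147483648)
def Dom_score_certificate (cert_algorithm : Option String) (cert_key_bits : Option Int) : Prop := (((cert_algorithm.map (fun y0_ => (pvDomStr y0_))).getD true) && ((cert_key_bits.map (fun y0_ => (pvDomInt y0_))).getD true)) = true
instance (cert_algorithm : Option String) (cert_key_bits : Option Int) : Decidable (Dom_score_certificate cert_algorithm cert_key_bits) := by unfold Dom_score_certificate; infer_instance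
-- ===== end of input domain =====

-- B classifies into a family via an ordered keyword map, then scores as base + additive indicator increments per bit threshold (objective: alternative).


-- ===== PORT A =====
def pvNormAlg (value : Option String) : String :=
  PySem.Str.replace (PySem.Str.replace (PySem.Str.replace (PySem.Str.replace
    (PySem.Str.upper (value.getD "")) "-" "") "_" "") " " "") "." ""

def score_certificate (cert_algorithm : Option String) (cert_key_bits : Option Int) : Int :=
  let algo := pvNormAlg cert_algorithm
  let bits := cert_key_bits.getD 0
  if ["MLDSA", "DILITHIUM", "SLHDSA", "SPHINCS"].any (fun pqc => PySem.Str.isIn pqc algo) then 20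
  else if PySem.Str.isIn "FALCON" algo then 18
  else if PySem.Str.isIn "ECDSA" algo then
    if bits ≥ 384 then 14
    else if bits ≥ 256 then 12
    else 8
  else if PySem.Str.isIn "RSA" algo then
    if bits ≥ 4096 then 10
    else if bits ≥ 3072 then 8
    else if bits ≥ 2048 then 6
    else if bits ≥ 1024 then 2
    else 0
  else if PySem.Str.isIn "ED25519" algo then 13
  else if PySem.Str.isIn "ED448" algo then 14
  else 0

-- ===== PORT B =====
-- ordered keyword -> family classification
def pvFamily : List (String × String) :=
  [("MLDSA", "PQC"), ("DILITHIUM", "PQC"), ("SLHDSA", "PQC"), ("SPHINCS", "PQC"),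
   ("FALCON", "FALCON"), ("ECDSA", "ECDSA"), ("RSA", "RSA"),
   ("ED25519", "ED25519"), ("ED448", "ED448")]

-- base score per family
def pvBase : List (String × Int) :=
  [("PQC", 20), ("FALCON", 18), ("ECDSA", 8), ("RSA", 0), ("ED25519", 13), ("ED448", 14)]

-- additive increments: (threshold, weight) contributes weight iff bits >= threshold
def pvSteps : List (String × List (Int × Int)) :=
  [("ECDSA", [(256, 4), (384, 2)]), ("RSA", [(1024, 2), (2048, 4), (3072, 2), (4096, 2)])]

-- dict.get(key, default): first-match association-list lookup
def pvGetD {α : Type} : List (String × α) → String → α → α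
  | [], _, d => d
  | (k, v) :: rest, key, d => if k == key then v else pvGetD rest key d

-- first family whose keyword occurs in algo (the `next(... )` generator)
def pvFindFam (algo : String) : List (String × String) → Option String
  | [] => none
  | (k, f) :: rest => if PySem.Str.isIn k algo then some f else pvFindFam algo rest

def score_certificate_alt (cert_algorithm : Option String) (cert_key_bits : Option Int) : Int :=
  let algo := pvNormAlg cert_algorithm
  let bits := cert_key_bits.getD 0
  match pvFindFam algo pvFamily with
  | none => 0
  | some fam =>
      pvGetD pvBase fam 0 +
        ((pvGetD pvSteps fam []).filter (fun tw => bits ≥ tw.1)).foldl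
          (fun acc tw => acc + tw.2) 0

-- ===== PRECONDITION & SPEC =====
def Spec_score_certificate (cert_algorithm : Option String) (cert_key_bits : Option Int) (out : Int) : Prop := out = score_certificate_alt cert_algorithm cert_key_bits
instance (cert_algorithm : Option String) (cert_key_bits : Option Int) (out : Int) : Decidable (Spec_score_certificate cert_algorithm cert_key_bits out) := by unfold Spec_score_certificate; infer_instance

-- ===== CLAIM (what is proved, stated in full; the proofs are below) =====
def Claim_equal_score_certificate : Prop := ∀ (cert_algorithm : Option String) (cert_key_bits : Option Int), Dom_score_certificate cert_algorithm cert_key_bits → Spec_score_certificate cert_algorithm cert_key_bits (score_certificate cert_algorithm cert_key_bits)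

-- ===== LEMMAS AND PROOFS =====

-- ===== VERDICT (by name: the statement is the Claim_ definition above) =====
theorem score_certificate_spec : Claim_equal_score_certificate := by
  intro cert_algorithm cert_key_bits _
  unfold Spec_score_certificate score_certificate score_certificate_alt
  simp only [pvFindFam, pvFamily, List.any_cons, List.any_nil, Bool.or_false]
  by_cases h1 : PySem.Str.isIn "MLDSA" (pvNormAlg cert_algorithm) = true
  · simp only [h1, Bool.false_eq_true, Bool.false_or, false_or, or_false, if_true, if_false]
    simp [pvGetD, pvBase, pvSteps]
  by_cases h2 : PySem.Str.isIn "DILITHIUM" (pvNormAlg cert_algorithm) = true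
  · simp only [Bool.not_eq_true] at h1
    simp only [h1, h2, Bool.false_eq_true, Bool.false_or, false_or, or_false, if_true, if_false]
    simp [pvGetD, pvBase, pvSteps]
  by_cases h3 : PySem.Str.isIn "SLHDSA" (pvNormAlg cert_algorithm) = true
  · simp only [Bool.not_eq_true] at h1 h2
    simp only [h1, h2, h3, Bool.false_eq_true, Bool.false_or, false_or, or_false, if_true, if_false]
    simp [pvGetD, pvBase, pvSteps]
  by_cases h4 : PySem.Str.isIn "SPHINCS" (pvNormAlg cert_algorithm) = true
  · simp only [Bool.not_eq_true] at h1 h2 h3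
    simp only [h1, h2, h3, h4, Bool.false_eq_true, Bool.false_or, false_or, or_false, if_true, if_false]
    simp [pvGetD, pvBase, pvSteps]
  by_cases h5 : PySem.Str.isIn "FALCON" (pvNormAlg cert_algorithm) = true
  · simp only [Bool.not_eq_true] at h1 h2 h3 h4
    simp only [h1, h2, h3, h4, h5, Bool.false_eq_true, Bool.false_or, false_or, or_false, if_true, if_false]
    simp [pvGetD, pvBase, pvSteps]
  by_cases h6 : PySem.Str.isIn "ECDSA" (pvNormAlg cert_algorithm) = true
  · simp only [Bool.not_eq_true] at h1 h2 h3 h4 h5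
    simp only [h1, h2, h3, h4, h5, h6, Bool.false_eq_true, Bool.false_or, false_or, or_false, if_true, if_false]
    simp [pvGetD, pvBase, pvSteps]
    simp only [List.filter_cons, List.filter_nil, List.foldl_cons, List.foldl_nil,
      decide_eq_true_eq]
    split_ifs <;> (try simp [List.foldl_cons, List.foldl_nil]) <;> omega
  by_cases h7 : PySem.Str.isIn "RSA" (pvNormAlg cert_algorithm) = true
  · simp only [Bool.not_eq_true] at h1 h2 h3 h4 h5 h6
    simp only [h1, h2, h3, h4, h5, h6, h7, Bool.false_eq_true, Bool.false_or, false_or, or_false, if_true, if_false]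
    simp [pvGetD, pvBase, pvSteps]
    simp only [List.filter_cons, List.filter_nil, List.foldl_cons, List.foldl_nil,
      decide_eq_true_eq]
    split_ifs <;> (try simp [List.foldl_cons, List.foldl_nil]) <;> omega
  by_cases h8 : PySem.Str.isIn "ED25519" (pvNormAlg cert_algorithm) = true
  · simp only [Bool.not_eq_true] at h1 h2 h3 h4 h5 h6 h7
    simp only [h1, h2, h3, h4, h5, h6, h7, h8, Bool.false_eq_true, Bool.false_or, false_or, or_false, if_true, if_false]
    simp [pvGetD, pvBase, pvSteps]
  by_cases h9 : PySem.Str.isIn "ED448" (pvNormAlg cert_algorithm) = true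
  · simp only [Bool.not_eq_true] at h1 h2 h3 h4 h5 h6 h7 h8
    simp only [h1, h2, h3, h4, h5, h6, h7, h8, h9, Bool.false_eq_true, Bool.false_or, false_or, or_false, if_true, if_false]
    simp [pvGetD, pvBase, pvSteps]
  · simp only [Bool.not_eq_true] at h1 h2 h3 h4 h5 h6 h7 h8 h9
    simp only [h1, h2, h3, h4, h5, h6, h7, h8, h9, Bool.false_eq_true, false_or, or_false, if_false]
    simp
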